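-- pv_equiv track=rewrite | github.com/IKnowU27735300/Resume.BUILDER | pdf_parser.py | _infer_label
-- ===== SOURCE A (Python) =====
-- def _infer_label(text, bbox, field_id):
--     """
--     Infer a meaningful label for a text field based on content and position.
--
--     Args:
--         text (str): The text content
--         bbox (tuple): Bounding box coordinates
--         field_id (int): Field identifier
--
--     Returns:
--         str: Inferred label
--     """
--     text_lower = text.lower()
--
--     # Check for common resume sections
--     if any(keyword in text_lower for keyword in ['name', 'title']):
--         return "Name/Title"
--     elif '@' in text and '.' in text:
--         return "Email"
--     elif any(keyword in text_lower for keyword in ['phone', 'mobile', 'tel']):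
--         return "Phone"
--     elif any(keyword in text_lower for keyword in ['address', 'location', 'city']):
--         return "Address"
--     elif any(keyword in text_lower for keyword in ['experience', 'work', 'employment']):
--         return "Work Experience Section"
--     elif any(keyword in text_lower for keyword in ['education', 'degree', 'university', 'college']):
--         return "Education Section"
--     elif any(keyword in text_lower for keyword in ['skill', 'expertise', 'proficiency']):
--         return "Skills Section"
--     elif any(keyword in text_lower for keyword in ['summary', 'objective', 'profile']):
--         return "Summary/Objective"
--     else:
--         # Generic label based on position
--         y_pos = bbox[1]
--         if y_pos < 150:
--             return f"Header Text {field_id}"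
--         else:
--             return f"Content {field_id}"
-- ===== SOURCE B (Python) =====
-- _KEYWORDS = [
--     ("name", 1), ("title", 1),
--     ("phone", 3), ("mobile", 3), ("tel", 3),
--     ("address", 4), ("location", 4), ("city", 4),
--     ("experience", 5), ("work", 5), ("employment", 5),
--     ("education", 6), ("degree", 6), ("university", 6), ("college", 6),
--     ("skill", 7), ("expertise", 7), ("proficiency", 7),
--     ("summary", 8), ("objective", 8), ("profile", 8),
-- ]
--
-- _LABELS = {
--     1: "Name/Title", 2: "Email", 3: "Phone", 4: "Address",
--     5: "Work Experience Section", 6: "Education Section",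
--     7: "Skills Section", 8: "Summary/Objective",
-- }
--
--
-- def _infer_label(text, bbox, field_id):
--     low = text.lower()
--     prios = [p for kw, p in _KEYWORDS if kw in low]
--     if '@' in text and '.' in text:
--         prios.append(2)
--     if prios:
--         return _LABELS[min(prios)]
--     return f"Header Text {field_id}" if bbox[1] < 150 else f"Content {field_id}"
-- ===== Notes on version B (the rewrite author's own statement) =====
-- stated objective: alternative
-- what changed: Replaces the ordered short-circuit if/elif chain by a scoring pass: a flat keyword-to-priority table is scanned once collecting the priorities of ALL matching keywords (plus priority 2 for the email test), and the label is looked up by the minimum priority; no value is matched first-come, the order is recovered arithmetically.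
import Mathlib
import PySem

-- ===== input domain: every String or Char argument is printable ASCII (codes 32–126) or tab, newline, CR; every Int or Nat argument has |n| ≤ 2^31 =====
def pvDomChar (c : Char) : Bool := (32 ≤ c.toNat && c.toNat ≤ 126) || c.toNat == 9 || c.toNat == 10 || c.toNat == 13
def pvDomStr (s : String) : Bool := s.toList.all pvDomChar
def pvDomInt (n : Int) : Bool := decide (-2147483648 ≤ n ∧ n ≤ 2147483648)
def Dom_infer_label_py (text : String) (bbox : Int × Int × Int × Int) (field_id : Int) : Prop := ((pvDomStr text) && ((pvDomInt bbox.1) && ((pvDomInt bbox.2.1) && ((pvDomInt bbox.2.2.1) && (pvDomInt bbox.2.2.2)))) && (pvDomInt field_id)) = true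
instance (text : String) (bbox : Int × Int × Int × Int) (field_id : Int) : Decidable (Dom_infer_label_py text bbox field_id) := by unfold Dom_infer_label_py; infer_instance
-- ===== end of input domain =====

-- B replaces A's ordered short-circuit if/elif chain by a scoring pass over a flat
-- keyword→priority table: all matching priorities are collected, the minimum wins,
-- and the label is looked up by priority (objective: alternative).

-- ===== PORT A =====
def infer_label_py (text : String) (bbox : Int × Int × Int × Int) (field_id : Int) : String :=
  let text_lower := PySem.Str.lower text
  if (["name", "title"] : List String).any (fun k => PySem.Str.isIn k text_lower) then "Name/Title"
  else if PySem.Str.isIn "@" text && PySem.Str.isIn "." text then "Email"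
  else if (["phone", "mobile", "tel"] : List String).any (fun k => PySem.Str.isIn k text_lower) then "Phone"
  else if (["address", "location", "city"] : List String).any (fun k => PySem.Str.isIn k text_lower) then "Address"
  else if (["experience", "work", "employment"] : List String).any (fun k => PySem.Str.isIn k text_lower) then "Work Experience Section"
  else if (["education", "degree", "university", "college"] : List String).any (fun k => PySem.Str.isIn k text_lower) then "Education Section"
  else if (["skill", "expertise", "proficiency"] : List String).any (fun k => PySem.Str.isIn k text_lower) then "Skills Section"
  else if (["summary", "objective", "profile"] : List String).any (fun k => PySem.Str.isIn k text_lower) then "Summary/Objective"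
  else
    let y_pos := bbox.2.1
    if y_pos < 150 then "Header Text " ++ PySem.Int.toStr field_id
    else "Content " ++ PySem.Int.toStr field_id

-- ===== PORT B =====
-- Source B's flat keyword → priority table (_KEYWORDS)
def pvKeywords : List (String × Int) :=
  [("name", 1), ("title", 1),
   ("phone", 3), ("mobile", 3), ("tel", 3),
   ("address", 4), ("location", 4), ("city", 4),
   ("experience", 5), ("work", 5), ("employment", 5),
   ("education", 6), ("degree", 6), ("university", 6), ("college", 6),
   ("skill", 7), ("expertise", 7), ("proficiency", 7),
   ("summary", 8), ("objective", 8), ("profile", 8)]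

-- Source B's priority → label dict (_LABELS)
def pvLabels : PySem.Dict Int String :=
  PySem.Dict.ofList
    [(1, "Name/Title"), (2, "Email"), (3, "Phone"), (4, "Address"),
     (5, "Work Experience Section"), (6, "Education Section"),
     (7, "Skills Section"), (8, "Summary/Objective")]

-- python's 'min(l)' guarded by 'if l:' — none on the empty list (Source B's "if prios: ... min(prios)")
def pvMin? : List Int → Option Int
  | [] => none
  | x :: xs => some (xs.foldl min x)

def infer_label_py_alt (text : String) (bbox : Int × Int × Int × Int) (field_id : Int) : String :=
  let low := PySem.Str.lower text
  let prios := (pvKeywords.filter (fun e => PySem.Str.isIn e.1 low)).map (fun e => e.2)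
  let prios := if PySem.Str.isIn "@" text && PySem.Str.isIn "." text then prios ++ [2] else prios
  match pvMin? prios with
  | some m => ((PySem.Dict.get? pvLabels m).getD "")
      -- _LABELS[min(prios)]: min(prios) is always a key of _LABELS, so the KeyError branch (none from get?) is unreachable
  | none =>
    if bbox.2.1 < 150 then "Header Text " ++ PySem.Int.toStr field_id
    else "Content " ++ PySem.Int.toStr field_id

-- ===== PRECONDITION & SPEC =====
def Spec_infer_label_py (text : String) (bbox : Int × Int × Int × Int) (field_id : Int) (out : String) : Prop := out = infer_label_py_alt text bbox field_id
instance (text : String) (bbox : Int × Int × Int × Int) (field_id : Int) (out : String) : Decidable (Spec_infer_label_py text bbox field_id out) := by unfold Spec_infer_label_py; infer_instance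

-- ===== CLAIM (what is proved, stated in full; the proofs are below) =====
def Claim_equal_infer_label_py : Prop := ∀ (text : String) (bbox : Int × Int × Int × Int) (field_id : Int), Dom_infer_label_py text bbox field_id → Spec_infer_label_py text bbox field_id (infer_label_py text bbox field_id)

-- ===== LEMMAS AND PROOFS =====

-- none-absorbing combination of two optional minima
def pvOmin : Option Int → Option Int → Option Int
  | none, b => b
  | a, none => a
  | some a, some b => some (min a b)

theorem pvFoldl_min_shift (ys : List Int) (a y : Int) :
    ys.foldl min (min a y) = min a (ys.foldl min y) := by
  induction ys generalizing y with
  | nil => rfl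
  | cons z ys ih =>
    simp only [List.foldl_cons]
    rw [min_assoc, ih]

theorem pvMin?_append (l1 l2 : List Int) :
    pvMin? (l1 ++ l2) = pvOmin (pvMin? l1) (pvMin? l2) := by
  cases l1 with
  | nil => simp [pvMin?, pvOmin]
  | cons x xs =>
    cases l2 with
    | nil => simp [pvMin?, pvOmin]
    | cons y ys =>
      simp only [pvMin?, pvOmin, List.cons_append, List.foldl_cons, List.foldl_append]
      rw [pvFoldl_min_shift ys (xs.foldl min x) y]

theorem pvFoldl_min_const (l : List Int) (p : Int) (h : ∀ x ∈ l, x = p) :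
    l.foldl min p = p := by
  induction l with
  | nil => rfl
  | cons x xs ih =>
    simp only [List.foldl_cons]
    rw [h x (List.mem_cons_self), min_self]
    exact ih (fun y hy => h y (List.mem_cons_of_mem _ hy))

-- a keyword group whose entries all carry priority p contributes
-- 'some p' iff any of its keywords matches
theorem pvSeg_min (ks : List (String × Int)) (t : String → Bool) (p : Int)
    (h : ∀ e ∈ ks, e.2 = p) :
    pvMin? ((ks.filter (fun e => t e.1)).map (fun e => e.2)) =
      (if ks.any (fun e => t e.1) then some p else none) := by
  induction ks with
  | nil => rfl
  | cons e ks ih =>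
    have he : e.2 = p := h e (List.mem_cons_self)
    have h' : ∀ x ∈ ks, x.2 = p := fun x hx => h x (List.mem_cons_of_mem _ hx)
    by_cases hc : t e.1 = true
    · simp only [List.filter_cons, List.any_cons, hc, if_pos, Bool.true_or,
        List.map_cons, pvMin?, he]
      refine congrArg some (pvFoldl_min_const _ p ?_)
      intro x hx
      obtain ⟨y, hy, rfl⟩ := List.mem_map.mp hx
      exact h' y (List.mem_of_mem_filter hy)
    · have hc' : t e.1 = false := by simpa using hc
      simp only [List.filter_cons, List.any_cons, hc', Bool.false_eq_true, if_false,
        Bool.false_or]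
      exact ih h'

-- ===== VERDICT (by name: the statement is the Claim_ definition above) =====
theorem infer_label_py_spec : Claim_equal_infer_label_py := by
  intro text bbox field_id _
  unfold Spec_infer_label_py
  simp only [infer_label_py, infer_label_py_alt]
  have hk : pvKeywords =
      [("name",(1:Int)),("title",1)] ++
      ([("phone",(3:Int)),("mobile",3),("tel",3)] ++
      ([("address",(4:Int)),("location",4),("city",4)] ++
      ([("experience",(5:Int)),("work",5),("employment",5)] ++
      ([("education",(6:Int)),("degree",6),("university",6),("college",6)] ++
      ([("skill",(7:Int)),("expertise",7),("proficiency",7)] ++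
      [("summary",(8:Int)),("objective",8),("profile",8)]))))) := rfl
  rw [hk]
  simp only [List.filter_append, List.map_append]
  cases he : (PySem.Str.isIn "@" text && PySem.Str.isIn "." text) with
  | true =>
    simp only [if_true]
    simp only [pvMin?_append]
    rw [pvSeg_min _ (fun k => PySem.Str.isIn k (PySem.Str.lower text)) 1 (by decide),
        pvSeg_min _ (fun k => PySem.Str.isIn k (PySem.Str.lower text)) 3 (by decide),
        pvSeg_min _ (fun k => PySem.Str.isIn k (PySem.Str.lower text)) 4 (by decide),
        pvSeg_min _ (fun k => PySem.Str.isIn k (PySem.Str.lower text)) 5 (by decide),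
        pvSeg_min _ (fun k => PySem.Str.isIn k (PySem.Str.lower text)) 6 (by decide),
        pvSeg_min _ (fun k => PySem.Str.isIn k (PySem.Str.lower text)) 7 (by decide),
        pvSeg_min _ (fun k => PySem.Str.isIn k (PySem.Str.lower text)) 8 (by decide)]
    simp only [List.any_cons, List.any_nil, Bool.or_false]

    generalize (PySem.Str.isIn "name" (PySem.Str.lower text) || PySem.Str.isIn "title" (PySem.Str.lower text)) = a1
    generalize (PySem.Str.isIn "phone" (PySem.Str.lower text) || (PySem.Str.isIn "mobile" (PySem.Str.lower text) || PySem.Str.isIn "tel" (PySem.Str.lower text))) = a3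
    generalize (PySem.Str.isIn "address" (PySem.Str.lower text) || (PySem.Str.isIn "location" (PySem.Str.lower text) || PySem.Str.isIn "city" (PySem.Str.lower text))) = a4
    generalize (PySem.Str.isIn "experience" (PySem.Str.lower text) || (PySem.Str.isIn "work" (PySem.Str.lower text) || PySem.Str.isIn "employment" (PySem.Str.lower text))) = a5
    generalize (PySem.Str.isIn "education" (PySem.Str.lower text) || (PySem.Str.isIn "degree" (PySem.Str.lower text) || (PySem.Str.isIn "university" (PySem.Str.lower text) || PySem.Str.isIn "college" (PySem.Str.lower text)))) = a6
    generalize (PySem.Str.isIn "skill" (PySem.Str.lower text) || (PySem.Str.isIn "expertise" (PySem.Str.lower text) || PySem.Str.isIn "proficiency" (PySem.Str.lower text))) = a7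
    generalize (PySem.Str.isIn "summary" (PySem.Str.lower text) || (PySem.Str.isIn "objective" (PySem.Str.lower text) || PySem.Str.isIn "profile" (PySem.Str.lower text))) = a8
    cases a1 <;> cases a3 <;> cases a4 <;> cases a5 <;> cases a6 <;> cases a7 <;> cases a8 <;> rfl
  | false =>
    simp only [Bool.false_eq_true, if_false]
    simp only [pvMin?_append]
    rw [pvSeg_min _ (fun k => PySem.Str.isIn k (PySem.Str.lower text)) 1 (by decide),
        pvSeg_min _ (fun k => PySem.Str.isIn k (PySem.Str.lower text)) 3 (by decide),
        pvSeg_min _ (fun k => PySem.Str.isIn k (PySem.Str.lower text)) 4 (by decide),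
        pvSeg_min _ (fun k => PySem.Str.isIn k (PySem.Str.lower text)) 5 (by decide),
        pvSeg_min _ (fun k => PySem.Str.isIn k (PySem.Str.lower text)) 6 (by decide),
        pvSeg_min _ (fun k => PySem.Str.isIn k (PySem.Str.lower text)) 7 (by decide),
        pvSeg_min _ (fun k => PySem.Str.isIn k (PySem.Str.lower text)) 8 (by decide)]
    simp only [List.any_cons, List.any_nil, Bool.or_false]

    generalize (PySem.Str.isIn "name" (PySem.Str.lower text) || PySem.Str.isIn "title" (PySem.Str.lower text)) = a1
    generalize (PySem.Str.isIn "phone" (PySem.Str.lower text) || (PySem.Str.isIn "mobile" (PySem.Str.lower text) || PySem.Str.isIn "tel" (PySem.Str.lower text))) = a3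
    generalize (PySem.Str.isIn "address" (PySem.Str.lower text) || (PySem.Str.isIn "location" (PySem.Str.lower text) || PySem.Str.isIn "city" (PySem.Str.lower text))) = a4
    generalize (PySem.Str.isIn "experience" (PySem.Str.lower text) || (PySem.Str.isIn "work" (PySem.Str.lower text) || PySem.Str.isIn "employment" (PySem.Str.lower text))) = a5
    generalize (PySem.Str.isIn "education" (PySem.Str.lower text) || (PySem.Str.isIn "degree" (PySem.Str.lower text) || (PySem.Str.isIn "university" (PySem.Str.lower text) || PySem.Str.isIn "college" (PySem.Str.lower text)))) = a6
    generalize (PySem.Str.isIn "skill" (PySem.Str.lower text) || (PySem.Str.isIn "expertise" (PySem.Str.lower text) || PySem.Str.isIn "proficiency" (PySem.Str.lower text))) = a7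
    generalize (PySem.Str.isIn "summary" (PySem.Str.lower text) || (PySem.Str.isIn "objective" (PySem.Str.lower text) || PySem.Str.isIn "profile" (PySem.Str.lower text))) = a8
    cases a1 <;> cases a3 <;> cases a4 <;> cases a5 <;> cases a6 <;> cases a7 <;> cases a8 <;> rfl
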